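-- pv_equiv track=rewrite | github.com/JacobRajca/pp1 | 04-Subroutines/zadanie44.py | f
-- ===== SOURCE A (Python) =====
-- def f(password):
--     i=0
--     new_string = ''
--     while i < len(password):
--         j=0
--         x=0
--         while j<len(password):
--             if i != j and password[i] == password[j]:
--                 x+=1
--             j+=1
--         if x == 0:
--             new_string = new_string + password[i]
--         i+=1
--     if len(new_string) >= 6:
--         return True
--     else:
--         return False
-- ===== SOURCE B (Python) =====
-- def f(password):
--     counts = {}
--     for c in password:
--         counts[c] = counts.get(c, 0) + 1
--     uniq = 0
--     for v in counts.values():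
--         if v == 1:
--             uniq += 1
--     return uniq >= 6
-- ===== Notes on version B (the rewrite author's own statement) =====
-- stated objective: faster
-- what changed: Replaces the quadratic rescan (for each position, an inner pass counting equal characters elsewhere) with a single pass building a frequency dictionary, then counting values equal to 1.
import Mathlib
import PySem

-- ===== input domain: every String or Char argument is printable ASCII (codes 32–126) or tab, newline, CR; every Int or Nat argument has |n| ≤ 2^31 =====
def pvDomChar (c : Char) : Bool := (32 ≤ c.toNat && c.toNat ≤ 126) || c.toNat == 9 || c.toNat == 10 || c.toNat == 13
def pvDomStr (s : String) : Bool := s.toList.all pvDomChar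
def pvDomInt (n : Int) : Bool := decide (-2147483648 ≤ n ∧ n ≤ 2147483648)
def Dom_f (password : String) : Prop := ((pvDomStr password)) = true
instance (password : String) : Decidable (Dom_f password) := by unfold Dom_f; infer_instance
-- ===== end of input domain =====

-- B replaces A's quadratic per-position rescan with a one-pass frequency dictionary (faster).

-- ===== PORT A =====
-- literal port: outer while over i, inner while over j counting equal chars at other positions
def f (password : String) : Bool :=
  let cs := password.toList
  let n : Int := (cs.length : Int)
  let new_string : List Char :=
    (PySem.List.pyRange 0 n 1).foldl (fun acc i =>
      let x : Int :=
        (PySem.List.pyRange 0 n 1).foldl (fun x j =>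
          if i ≠ j ∧ PySem.List.pyGetD cs i ' ' = PySem.List.pyGetD cs j ' ' then x + 1 else x) 0
      if x = 0 then acc ++ [PySem.List.pyGetD cs i ' '] else acc) []
  decide (6 ≤ new_string.length)

-- ===== PORT B =====
-- literal port of Source B: build counts dict in one pass, then count values equal to 1
def f_alt (password : String) : Bool :=
  let counts : PySem.Dict Char Int :=
    password.toList.foldl (fun d c => d.insert c (d.getD c 0 + 1)) PySem.Dict.empty
  let uniq : Int :=
    counts.values.foldl (fun acc v => if v = 1 then acc + 1 else acc) 0
  decide (6 ≤ uniq)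

-- ===== PRECONDITION & SPEC =====
def Spec_f (password : String) (out : Bool) : Prop := out = f_alt password
instance (password : String) (out : Bool) : Decidable (Spec_f password out) := by unfold Spec_f; infer_instance

-- ===== CLAIM (what is proved, stated in full; the proofs are below) =====
def Claim_equal_f : Prop := ∀ (password : String), Dom_f password → Spec_f password (f password)

-- ===== LEMMAS AND PROOFS =====

-- removing one index i (where q holds) from a nodup list drops the countP by one
lemma countP_ne_and_mem (l : List Int) (hl : l.Nodup) (i : Int) (hi : i ∈ l)
    (q : Int → Bool) (hq : q i = true) :
    l.countP (fun j => decide (j ≠ i) && q j) = l.countP q - 1 := by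
  obtain ⟨s, t, rfl⟩ := List.append_of_mem hi
  rw [List.nodup_append] at hl
  obtain ⟨hs, ht, hdisj⟩ := hl
  have his : i ∉ s := fun h => hdisj i h i (by simp) rfl
  have hit : i ∉ t := (List.nodup_cons.mp ht).1
  have hcs : s.countP (fun j => decide (j ≠ i) && q j) = s.countP q := by
    apply List.countP_congr
    intro a ha
    have : a ≠ i := fun h => his (h ▸ ha)
    simp [this]
  have hct : t.countP (fun j => decide (j ≠ i) && q j) = t.countP q := by
    apply List.countP_congr
    intro a ha
    have : a ≠ i := fun h => hit (h ▸ ha)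
    simp [this]
  rw [List.countP_append, List.countP_cons, List.countP_append, List.countP_cons, hcs, hct]
  simp [hq]

-- A's result is: filter the string to characters occurring exactly once
-- an in-range python index yields an element of the list
lemma pyGetD_mem (cs : List Char) (i : Int) (h0 : 0 ≤ i) (hn : i < (cs.length : Int)) :
    PySem.List.pyGetD cs i ' ' ∈ cs := by
  have hmap : (PySem.List.pyRange 0 (cs.length : Int) 1).map (fun j => PySem.List.pyGetD cs j ' ') = cs :=
    PySem.List.map_pyGetD_pyRange_zero' cs ' '
  have hiR : i ∈ PySem.List.pyRange 0 (cs.length : Int) 1 := by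
    rw [PySem.List.mem_pyRange_one]; exact ⟨h0, hn⟩
  have := List.mem_map_of_mem (f := fun j => PySem.List.pyGetD cs j ' ') hiR
  rw [hmap] at this
  exact this

-- the inner while loop computes (count of cs[i] in cs) - 1
lemma inner_count (cs : List Char) (i : Int) (h0 : 0 ≤ i) (hn : i < (cs.length : Int)) :
    (PySem.List.pyRange 0 (cs.length : Int) 1).foldl
      (fun x j => if i ≠ j ∧ PySem.List.pyGetD cs i ' ' = PySem.List.pyGetD cs j ' ' then x + 1 else x) 0
    = (cs.count (PySem.List.pyGetD cs i ' ') : Int) - 1 := by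
  rw [PySem.List.foldl_ite_add_one]
  have hmap : (PySem.List.pyRange 0 (cs.length : Int) 1).map (fun j => PySem.List.pyGetD cs j ' ') = cs :=
    PySem.List.map_pyGetD_pyRange_zero' cs ' '
  have hiR : i ∈ PySem.List.pyRange 0 (cs.length : Int) 1 := by
    rw [PySem.List.mem_pyRange_one]; exact ⟨h0, hn⟩
  have hcount : ∀ v : Char, (PySem.List.pyRange 0 (cs.length : Int) 1).countP
      (fun j => decide (v = PySem.List.pyGetD cs j ' ')) = cs.count v := by
    intro v
    conv_rhs => rw [← hmap]
    rw [List.count_eq_countP, List.countP_map]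
    apply List.countP_congr
    intro a _
    simp only [Function.comp_apply, beq_iff_eq, decide_eq_true_eq]
    exact eq_comm
  have hmem : PySem.List.pyGetD cs i ' ' ∈ cs := pyGetD_mem cs i h0 hn
  have hpos : 1 ≤ cs.count (PySem.List.pyGetD cs i ' ') := List.one_le_count_iff.mpr hmem
  have hsplit : (PySem.List.pyRange 0 (cs.length : Int) 1).countP
      (fun j => decide (i ≠ j ∧ PySem.List.pyGetD cs i ' ' = PySem.List.pyGetD cs j ' '))
      = (PySem.List.pyRange 0 (cs.length : Int) 1).countP
          (fun j => decide (j ≠ i) && decide (PySem.List.pyGetD cs i ' ' = PySem.List.pyGetD cs j ' ')) := by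
    apply List.countP_congr
    intro a _
    constructor <;> intro h <;> simp_all <;> tauto
  rw [hsplit, countP_ne_and_mem _ (PySem.List.nodup_pyRange_one 0 (cs.length : Int)) i hiR _ (by simp),
    hcount (PySem.List.pyGetD cs i ' ')]
  omega

lemma f_eq_filter (s : String) :
    f s = decide (6 ≤ (s.toList.filter (fun c => s.toList.count c = 1)).length) := by
  simp only [f]
  have hbody : ∀ i ∈ PySem.List.pyRange 0 (s.toList.length : Int) 1, ∀ acc : List Char,
      (if (PySem.List.pyRange 0 (s.toList.length : Int) 1).foldl
          (fun x j => if i ≠ j ∧ PySem.List.pyGetD s.toList i ' ' = PySem.List.pyGetD s.toList j ' ' then x + 1 else x) (0 : Int) = 0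
        then acc ++ [PySem.List.pyGetD s.toList i ' '] else acc)
      = (if s.toList.count (PySem.List.pyGetD s.toList i ' ') = 1
        then acc ++ [PySem.List.pyGetD s.toList i ' '] else acc) := by
    intro i hi acc
    rw [PySem.List.mem_pyRange_one] at hi
    rw [inner_count s.toList i hi.1 hi.2]
    have hpos : 1 ≤ s.toList.count (PySem.List.pyGetD s.toList i ' ') :=
      List.one_le_count_iff.mpr (pyGetD_mem s.toList i hi.1 hi.2)
    by_cases h : s.toList.count (PySem.List.pyGetD s.toList i ' ') = 1
    · rw [if_pos (by omega : ((s.toList.count (PySem.List.pyGetD s.toList i ' ') : Int) - 1) = 0), if_pos h]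
    · rw [if_neg (by omega : ¬ ((s.toList.count (PySem.List.pyGetD s.toList i ' ') : Int) - 1) = 0), if_neg h]
  rw [PySem.List.foldl_congr_mem' (PySem.List.pyRange 0 (s.toList.length : Int) 1)
      (fun acc i => if (PySem.List.pyRange 0 (s.toList.length : Int) 1).foldl
          (fun x j => if i ≠ j ∧ PySem.List.pyGetD s.toList i ' ' = PySem.List.pyGetD s.toList j ' ' then x + 1 else x) (0 : Int) = 0
        then acc ++ [PySem.List.pyGetD s.toList i ' '] else acc)
      (fun acc i => if s.toList.count (PySem.List.pyGetD s.toList i ' ') = 1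
        then acc ++ [PySem.List.pyGetD s.toList i ' '] else acc)
      [] hbody]
  rw [PySem.List.foldl_pyRange_zero_pyGetD' s.toList ' '
      (fun acc c => if s.toList.count c = 1 then acc ++ [c] else acc) []]
  rw [PySem.List.foldl_append_ite_eq_filter]
  simp

-- B's result is: count distinct characters occurring exactly once
lemma f_alt_eq_filter (s : String) :
    f_alt s =
      decide (6 ≤ ((PySem.List.dedup s.toList).filter (fun c => s.toList.count c = 1)).length) := by
  simp only [f_alt]
  rw [PySem.Dict.foldl_insert_getD_add_one_eq_counter, PySem.List.foldl_ite_add_one]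
  simp only [PySem.Dict.values, PySem.Dict.items_counter, List.map_map, List.countP_map]
  rw [List.countP_eq_length_filter]
  have hc : ∀ k ∈ PySem.Set.ofList s.toList,
      ((fun v : Int => decide (v = 1)) ∘ (fun p : Char × Int => p.2) ∘ fun k => (k, (s.toList.count k : Int))) k
        = (fun c => decide (s.toList.count c = 1)) k := by
    intro k _; simp
  rw [List.filter_congr hc]
  simp [PySem.List.dedup_eq_ofList]

-- the two filtered lists have equal length: both are nodup with the same members
lemma filter_count_one_length (cs : List Char) :
    (cs.filter (fun c => cs.count c = 1)).length
      = ((PySem.List.dedup cs).filter (fun c => cs.count c = 1)).length := by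
  have h1 : (cs.filter (fun c => cs.count c = 1)).Nodup := by
    rw [List.nodup_iff_count_le_one]
    intro a
    by_cases h : cs.count a = 1
    · rw [List.count_filter (by simp [h])]
      omega
    · have ha : a ∉ cs.filter (fun c => cs.count c = 1) := by simp [h]
      simp [List.count_eq_zero.mpr ha]
  have h2 : ((PySem.List.dedup cs).filter (fun c => cs.count c = 1)).Nodup :=
    (PySem.List.nodup_dedup cs).filter _
  rw [← List.toFinset_card_of_nodup h1, ← List.toFinset_card_of_nodup h2]
  congr 1
  ext a
  simp

-- ===== VERDICT (by name: the statement is the Claim_ definition above) =====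
theorem f_spec : Claim_equal_f := by
  intro password _
  unfold Spec_f
  rw [f_eq_filter, f_alt_eq_filter, filter_count_one_length]
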